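-- pv_equiv track=rewrite | github.com/epoyraz/leetcode | solutions/2757.py | decrement_str
-- ===== SOURCE A (Python) =====
-- def decrement_str(s):
--     lst = list(s)
--     i = len(lst) - 1
--     while i >= 0:
--         if lst[i] == '0':
--             lst[i] = '9'
--             i -= 1
--         else:
--             lst[i] = chr(ord(lst[i]) - 1)
--             break
--     if lst and lst[0] == '0':
--         lst.pop(0)
--     return ''.join(lst)
-- ===== SOURCE B (Python) =====
-- def decrement_str(s):
--     # Single forward pass: stream the characters left-to-right, keeping the
--     # most recent non-'0' character pending and counting the zeros seen since.
--     committed = []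
--     pending = None
--     zeros = 0
--     for c in s:
--         if c == '0':
--             zeros += 1
--         else:
--             if pending is not None:
--                 committed.append(pending)
--             committed.extend('0' * zeros)
--             pending = c
--             zeros = 0
--     if pending is None:
--         return '9' * len(s)
--     res = committed + [chr(ord(pending) - 1)] + ['9'] * zeros
--     if res[0] == '0':
--         res = res[1:]
--     return ''.join(res)
-- ===== Notes on version B (the rewrite author's own statement) =====
-- stated objective: alternative
-- what changed: B replaces A's backward in-place borrow loop (walk from the end turning zeros into nines, decrement the first non-zero, break) by a single forward left-to-right pass that keeps the latest non-zero character pending with a count of zeros seen since it, then emits committed prefix + decremented pending character + that many nines.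
import Mathlib
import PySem

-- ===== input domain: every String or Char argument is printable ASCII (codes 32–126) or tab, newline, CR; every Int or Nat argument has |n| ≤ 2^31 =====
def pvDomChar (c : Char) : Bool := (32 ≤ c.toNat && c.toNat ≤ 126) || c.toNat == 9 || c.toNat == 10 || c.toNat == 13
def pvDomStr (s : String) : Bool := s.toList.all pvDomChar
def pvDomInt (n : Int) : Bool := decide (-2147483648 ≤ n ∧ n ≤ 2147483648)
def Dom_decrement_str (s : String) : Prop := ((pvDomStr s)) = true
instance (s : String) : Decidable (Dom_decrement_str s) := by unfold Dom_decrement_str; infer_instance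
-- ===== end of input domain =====

-- B replaces A's backward in-place borrow loop by a single forward pass keeping the latest
-- non-'0' character pending and a count of zeros since it (objective: alternative, same cost).

-- ===== PORT A =====
-- while i >= 0: replace trailing '0' by '9'; decrement the first non-'0' from the right and break.
-- fuel k stands for i+1 (k = 0 means i < 0, the loop condition fails).
def pvALoop (lst : List Char) : Nat → List Char
  | 0 => lst
  | k + 1 =>
      if lst.getD k ' ' == '0' then
        pvALoop (lst.set k '9') k
      else
        lst.set k (Char.ofNat ((lst.getD k ' ').toNat - 1))

def decrement_str (s : String) : String :=
  let lst := pvALoop s.toList s.toList.length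
  -- if lst and lst[0] == '0': lst.pop(0)
  let lst2 := match lst with
    | [] => lst
    | c :: rest => if c == '0' then rest else lst
  String.mk lst2

-- ===== PORT B =====
-- state = (committed, pending, zeros); one forward pass over the characters
def pvBStep (st : List Char × Option Char × Nat) (c : Char) : List Char × Option Char × Nat :=
  let (committed, pending, zeros) := st
  if c == '0' then (committed, pending, zeros + 1)
  else
    let committed' := (match pending with
      | some p => committed ++ [p]
      | none => committed) ++ List.replicate zeros '0'
    (committed', some c, 0)

def decrement_str_alt (s : String) : String :=
  let st := s.toList.foldl pvBStep ([], none, 0)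
  match st.2.1 with
  | none => String.mk (List.replicate s.toList.length '9')
  | some p =>
      let res := st.1 ++ Char.ofNat (p.toNat - 1) :: List.replicate st.2.2 '9'
      String.mk (if res.headD ' ' == '0' then res.tail else res)

-- ===== PRECONDITION & SPEC =====
def Spec_decrement_str (s : String) (out : String) : Prop := out = decrement_str_alt s
instance (s : String) (out : String) : Decidable (Spec_decrement_str s out) := by unfold Spec_decrement_str; infer_instance

-- ===== CLAIM (what is proved, stated in full; the proofs are below) =====
def Claim_equal_decrement_str : Prop := ∀ (s : String), Dom_decrement_str s → Spec_decrement_str s (decrement_str s)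

-- ===== LEMMAS AND PROOFS =====

-- pvBFind cs k = index of the last non-'0' among positions < k (none if all are '0');
-- used only as the common characterisation of both ports in the proofs.
def pvBFind (cs : List Char) : Nat → Option Nat
  | 0 => none
  | k + 1 => if cs.getD k ' ' == '0' then pvBFind cs k else some k

lemma pvBFind_lt (cs : List Char) : ∀ k j, pvBFind cs k = some j → j < k := by
  intro k
  induction k with
  | zero => intro j h; simp [pvBFind] at h
  | succ k ih =>
      intro j h
      simp only [pvBFind] at h
      split at h
      · exact Nat.lt_succ_of_lt (ih j h)
      · simp at h; omega

lemma pvBFind_set_ge (a : Char) : ∀ (k : Nat) (cs : List Char) (i : Nat), k ≤ i →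
    pvBFind (cs.set i a) k = pvBFind cs k := by
  intro k
  induction k with
  | zero => intro cs i _; simp [pvBFind]
  | succ k ih =>
      intro cs i hk
      have hne : i ≠ k := by omega
      simp only [pvBFind, List.getD, List.getElem?_set_ne hne]
      simp [ih cs i (by omega)]

lemma pvBFind_append (ys : List Char) : ∀ (k : Nat) (cs : List Char), k ≤ cs.length →
    pvBFind (cs ++ ys) k = pvBFind cs k := by
  intro k
  induction k with
  | zero => intro cs _; simp [pvBFind]
  | succ k ih =>
      intro cs hk
      have hget : (cs ++ ys).getD k ' ' = cs.getD k ' ' := by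
        simp [List.getD, List.getElem?_append_left (by omega : k < cs.length)]
      simp only [pvBFind, hget, ih cs (by omega)]

lemma pvBFind_none_all_zero (cs : List Char) : ∀ k, pvBFind cs k = none →
    ∀ i, i < k → cs.getD i ' ' = '0' := by
  intro k
  induction k with
  | zero => intro _ i hi; omega
  | succ k ih =>
      intro h i hi
      simp only [pvBFind] at h
      by_cases h0 : (cs.getD k ' ' == '0') = true
      · rw [if_pos h0] at h
        rcases Nat.lt_succ_iff_lt_or_eq.mp hi with h' | h'
        · exact ih h i h'
        · subst h'; exact eq_of_beq h0
      · rw [if_neg h0] at h; simp at h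

lemma pvBFind_zeros_after (cs : List Char) : ∀ k j, pvBFind cs k = some j →
    ∀ i, j < i → i < k → cs.getD i ' ' = '0' := by
  intro k
  induction k with
  | zero => intro j h; simp [pvBFind] at h
  | succ k ih =>
      intro j h i hji hik
      simp only [pvBFind] at h
      by_cases h0 : (cs.getD k ' ' == '0') = true
      · rw [if_pos h0] at h
        rcases Nat.lt_succ_iff_lt_or_eq.mp hik with h' | h'
        · exact ih j h i hji h'
        · subst h'; exact eq_of_beq h0
      · rw [if_neg h0] at h
        simp at h; omega

-- characterisation of A's loop (fuel k = i+1) via pvBFind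
lemma pvALoop_eq (k : Nat) : ∀ (cs : List Char), k ≤ cs.length →
    pvALoop cs k =
      match pvBFind cs k with
      | none => List.replicate k '9' ++ cs.drop k
      | some j => cs.take j ++ Char.ofNat ((cs.getD j ' ').toNat - 1) ::
                    (List.replicate (k - 1 - j) '9' ++ cs.drop k) := by
  induction k with
  | zero => intro cs _; simp [pvALoop, pvBFind]
  | succ k ih =>
      intro cs hk
      have hklen : k < cs.length := by omega
      simp only [pvALoop, pvBFind]
      have hdrop : (cs.set k '9').drop k = '9' :: cs.drop (k + 1) := by
        have hlt : (cs.take k).length = k := by simp [Nat.le_of_lt hklen]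
        have h2 := List.drop_left (l₁ := cs.take k) (l₂ := '9' :: cs.drop (k + 1))
        rw [hlt] at h2
        rw [List.set_eq_take_append_cons_drop, if_pos hklen]
        exact h2
      by_cases h0 : (cs.getD k ' ' == '0') = true
      · simp only [if_pos h0]
        rw [ih (cs.set k '9') (by simpa using Nat.le_of_lt hklen),
            pvBFind_set_ge '9' k cs k (le_refl k)]
        cases hbf : pvBFind cs k with
        | none =>
            simp only [hdrop]
            rw [show ('9' :: cs.drop (k+1)) = ['9'] ++ cs.drop (k+1) from rfl,
                ← List.append_assoc, ← List.replicate_succ']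
        | some j =>
            have hj : j < k := pvBFind_lt cs k j hbf
            have htake : (cs.set k '9').take j = cs.take j := by
              rw [List.take_set]
              exact List.set_eq_of_length_le (by simp; omega)
            have hget : (cs.set k '9').getD j ' ' = cs.getD j ' ' := by
              simp [List.getD, List.getElem?_set_ne (by omega : k ≠ j)]
            simp only [htake, hget, hdrop]
            have h1 : k + 1 - 1 - j = (k - 1 - j) + 1 := by omega
            rw [h1, List.replicate_succ']
            simp
      · simp only [if_neg h0]
        rw [List.set_eq_take_append_cons_drop, if_pos hklen]
        simp

-- characterisation of B's forward fold via pvBFind (reverse induction on the list)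
lemma pvBFold_eq (cs : List Char) :
    cs.foldl pvBStep ([], none, 0) =
      match pvBFind cs cs.length with
      | none => ([], none, cs.length)
      | some j => (cs.take j, some (cs.getD j ' '), cs.length - 1 - j) := by
  induction cs using List.reverseRecOn with
  | nil => simp [pvBFind]
  | append_singleton cs c ih =>
      rw [List.foldl_append, ih]
      have hlen : (cs ++ [c]).length = cs.length + 1 := by simp
      have hgetlast : (cs ++ [c]).getD cs.length ' ' = c := by
        simp [List.getD]
      rw [hlen]
      simp only [pvBFind, hgetlast, pvBFind_append [c] cs.length cs (le_refl _)]
      by_cases h0 : (c == '0') = true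
      · simp only [if_pos h0]
        cases hbf : pvBFind cs cs.length with
        | none => simp [List.foldl, pvBStep, h0]
        | some j =>
            have hj : j < cs.length := pvBFind_lt cs _ j hbf
            have htake : (cs ++ [c]).take j = cs.take j :=
              List.take_append_of_le_length (by omega)
            have hget : (cs ++ [c]).getD j ' ' = cs.getD j ' ' := by
              simp [List.getD, List.getElem?_append_left (by omega : j < cs.length)]
            simp only [List.foldl, pvBStep, if_pos h0, htake, hget]
            have : cs.length + 1 - 1 - j = (cs.length - 1 - j) + 1 := by omega
            rw [this]
      · simp only [if_neg h0]
        cases hbf : pvBFind cs cs.length with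
        | none =>
            have hall : ∀ i, i < cs.length → cs.getD i ' ' = '0' :=
              pvBFind_none_all_zero cs _ hbf
            have hcs : cs = List.replicate cs.length '0' := by
              apply List.ext_getElem (by simp)
              intro i hi _
              have := hall i hi
              simpa [List.getD, List.getElem?_eq_getElem hi] using this
            simp only [List.foldl, pvBStep, if_neg h0]
            rw [hgetlast, show cs.length + 1 - 1 - cs.length = 0 from by omega,
                List.take_left' rfl, List.nil_append, ← hcs]
        | some j =>
            have hj : j < cs.length := pvBFind_lt cs _ j hbf
            have hzeros : ∀ i, j < i → i < cs.length → cs.getD i ' ' = '0' :=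
              pvBFind_zeros_after cs _ j hbf
            have hdropeq : cs.drop (j + 1) = List.replicate (cs.length - 1 - j) '0' := by
              apply List.ext_getElem (by simp; omega)
              intro i hi1 hi2
              have hlt : j + 1 + i < cs.length := by simp at hi1; omega
              have := hzeros (j + 1 + i) (by omega) hlt
              simpa [List.getD, List.getElem_drop, List.getElem?_eq_getElem hlt] using this
            have h2 : cs.take j ++ [cs.getD j ' '] ++ cs.drop (j + 1) = cs := by
              have hget : cs.getD j ' ' = cs[j] := by
                simp [List.getD, List.getElem?_eq_getElem hj]
              rw [hget, List.append_assoc, List.singleton_append,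
                  List.getElem_cons_drop, List.take_append_drop]
            simp only [List.foldl, pvBStep, if_neg h0]
            rw [hgetlast, show cs.length + 1 - 1 - cs.length = 0 from by omega,
                List.take_left' rfl, ← hdropeq, h2]

-- ===== VERDICT (by name: the statement is the Claim_ definition above) =====
theorem decrement_str_spec : Claim_equal_decrement_str := by
  intro s _
  unfold Spec_decrement_str decrement_str decrement_str_alt
  set cs := s.toList with hcs
  simp only
  rw [pvALoop_eq cs.length cs (le_refl _), pvBFold_eq cs]
  cases hbf : pvBFind cs cs.length with
  | none =>
      simp only [List.drop_length, List.append_nil]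
      cases hn : cs.length with
      | zero => simp
      | succ m => simp [List.replicate_succ]
  | some j =>
      simp only [List.drop_length, List.append_nil]
      cases hL : cs.take j ++ Char.ofNat ((cs.getD j ' ').toNat - 1) ::
          List.replicate (cs.length - 1 - j) '9' with
      | nil => simp at hL
      | cons c rest =>
          by_cases hc : (c == '0') = true <;> simp [hc]
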